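-- pv_equiv track=rewrite | github.com/Kbr85/UMSAP | CODE/data/method.py | ResControl2DF
-- ===== SOURCE A (Python) =====
-- def ResControl2DF(
--     val  : list[list[list[int]]],
--     start: int,
--     ) -> list[list[list[int]]]:
--     """Convert the Result - Control column numbers in the original file to the
--         column numbers of the initial dataframe used in the analysis.
--
--         Parameters
--         ----------
--         val : list of list of list of int
--             Result - Control as a list of list of list of int
--         start : int
--             Column index start of the Result - Control columns in the initial
--             dataframe
--
--         Returns
--         -------
--         list[list[list[int]]]
--             The list has the same order as the input val but the column index
--             are adjusted.
--
--         Notes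
--         -----
--         It is assumed columns in the DF have the same order as in val.
--         Empty list are possible to mimic empty conditions in an experiment.
--
--         Examples
--         --------
--         >>> ResControl2DF([[[0,1,2], []], [[6,7,8], []]], 1)
--         >>> [[[1,2,3],[]], [[4,5,6],[]]]
--     """
--     # Test in test.unit.test_method.Test_ResControl2DF
--     #region -------------------------------------------------------> Variables
--     idx  = start
--     outL = []
--     #endregion ----------------------------------------------------> Variables
--
--     #region --------------------------------------------------> Adjust col idx
--     for row in val:
--         #------------------------------>
--         outR = []
--         #------------------------------>
--         for col in row:
--             #------------------------------>
--             outC = []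
--             #------------------------------>
--             for _ in col:
--                 outC.append(idx)
--                 idx += 1
--             #------------------------------>
--             outR.append(outC)
--         #------------------------------>
--         outL.append(outR)
--     #endregion -----------------------------------------------> Adjust col idx
--
--     return outL
-- ===== SOURCE B (Python) =====
-- def ResControl2DF(
--     val  : list[list[list[int]]],
--     start: int,
--     ) -> list[list[list[int]]]:
--     # Precompute the flat sequence of new indices, then partition it by val's shape.
--     N = sum(len(col) for row in val for col in row)
--     seq = list(range(start, start + N))
--     p = 0
--     outL = []
--     for row in val:
--         outR = []
--         for col in row:
--             outR.append(seq[p:p + len(col)])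
--             p += len(col)
--         outL.append(outR)
--     return outL
-- ===== Notes on version B (the rewrite author's own statement) =====
-- stated objective: alternative
-- what changed: B precomputes the flat renumbering sequence range(start, start+N) once and partitions it by slicing with a single pointer, instead of A's interleaved per-element counter increment and append.
import Mathlib
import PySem

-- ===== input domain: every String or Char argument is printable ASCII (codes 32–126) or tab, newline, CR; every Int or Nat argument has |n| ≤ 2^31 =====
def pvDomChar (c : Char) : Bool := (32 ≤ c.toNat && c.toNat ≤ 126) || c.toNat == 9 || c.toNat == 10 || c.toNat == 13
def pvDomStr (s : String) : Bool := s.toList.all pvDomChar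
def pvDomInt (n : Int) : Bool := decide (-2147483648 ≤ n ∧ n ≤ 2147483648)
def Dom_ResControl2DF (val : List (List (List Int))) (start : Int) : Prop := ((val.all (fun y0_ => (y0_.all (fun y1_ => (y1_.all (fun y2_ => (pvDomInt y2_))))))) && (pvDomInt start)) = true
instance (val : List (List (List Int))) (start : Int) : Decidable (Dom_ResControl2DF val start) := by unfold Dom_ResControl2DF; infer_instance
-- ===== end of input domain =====

-- B precomputes the flat sequence range(start, start+N) once and partitions it by
-- slicing with a pointer, instead of A's interleaved counter increment and append.

-- ===== PORT A =====
def ResControl2DF (val : List (List (List Int))) (start : Int) : List (List (List Int)) :=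
  -- idx = start; outL = []; triple nested loop appending idx and incrementing
  (val.foldl (fun (st : Int × List (List (List Int))) row =>
    let rr := row.foldl (fun (st2 : Int × List (List Int)) col =>
      let cc := col.foldl (fun (st3 : Int × List Int) _ => (st3.1 + 1, st3.2 ++ [st3.1])) (st2.1, [])
      (cc.1, st2.2 ++ [cc.2])) (st.1, [])
    (rr.1, st.2 ++ [rr.2])) (start, [])).2

-- ===== PORT B =====
def ResControl2DF_alt (val : List (List (List Int))) (start : Int) : List (List (List Int)) :=
  -- N = sum(len(col) ...); seq = list(range(start, start+N)); slice seq[p:p+len(col)]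
  let N : Int := (val.map (fun row => (row.map (fun col => (col.length : Int))).sum)).sum
  let seq := PySem.List.pyRange start (start + N) 1
  (val.foldl (fun (st : Int × List (List (List Int))) row =>
    let rr := row.foldl (fun (st2 : Int × List (List Int)) col =>
      (st2.1 + (col.length : Int),
       st2.2 ++ [PySem.List.slice seq (some st2.1) (some (st2.1 + (col.length : Int)))])) (st.1, [])
    (rr.1, st.2 ++ [rr.2])) ((0 : Int), [])).2

-- ===== PRECONDITION & SPEC =====
def Spec_ResControl2DF (val : List (List (List Int))) (start : Int) (out : List (List (List Int))) : Prop := out = ResControl2DF_alt val start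
instance (val : List (List (List Int))) (start : Int) (out : List (List (List Int))) : Decidable (Spec_ResControl2DF val start out) := by unfold Spec_ResControl2DF; infer_instance

-- ===== CLAIM (what is proved, stated in full; the proofs are below) =====
def Claim_equal_ResControl2DF : Prop := ∀ (val : List (List (List Int))) (start : Int), Dom_ResControl2DF val start → Spec_ResControl2DF val start (ResControl2DF val start)

-- ===== LEMMAS AND PROOFS =====

/-- size of one row: number of leaf integers -/
def rowSz (row : List (List Int)) : Nat := (row.map List.length).sum
/-- total number of leaf integers -/
def totSz (val : List (List (List Int))) : Nat := (val.map rowSz).sum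

/-- common closed form of one processed row -/
def specRow (idx : Int) : List (List Int) → List (List Int)
  | [] => []
  | c :: t => PySem.List.pyRange idx (idx + c.length) 1 :: specRow (idx + c.length) t

/-- common closed form of the whole output -/
def specAll (idx : Int) : List (List (List Int)) → List (List (List Int))
  | [] => []
  | r :: t => specRow idx r :: specAll (idx + rowSz r) t

lemma A_inner (col : List Int) : ∀ (idx : Int) (acc : List Int),
    col.foldl (fun (st3 : Int × List Int) _ => (st3.1 + 1, st3.2 ++ [st3.1])) (idx, acc)
      = (idx + col.length, acc ++ PySem.List.pyRange idx (idx + col.length) 1) := by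
  induction col with
  | nil => intro idx acc; simp [PySem.List.pyRange_one_eq_nil]
  | cons h t ih =>
      intro idx acc
      simp only [List.foldl_cons, ih (idx + 1) (acc ++ [idx]), List.length_cons,
        Prod.mk.injEq]
      refine ⟨by push_cast; ring, ?_⟩
      have hb : idx + ((t.length + 1 : Nat) : Int) = idx + 1 + (t.length : Nat) := by
        push_cast; ring
      rw [hb, PySem.List.pyRange_one_cons (a := idx) (b := idx + 1 + (t.length : Int)) (by omega)]
      simp

lemma A_row (row : List (List Int)) : ∀ (idx : Int) (acc : List (List Int)),
    row.foldl (fun (st2 : Int × List (List Int)) col =>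
      let cc := col.foldl (fun (st3 : Int × List Int) _ => (st3.1 + 1, st3.2 ++ [st3.1])) (st2.1, [])
      (cc.1, st2.2 ++ [cc.2])) (idx, acc)
      = (idx + rowSz row, acc ++ specRow idx row) := by
  induction row with
  | nil => intro idx acc; simp [rowSz, specRow]
  | cons c t ih =>
      intro idx acc
      simp only [List.foldl_cons, A_inner c idx [], List.nil_append, ih, Prod.mk.injEq]
      refine ⟨by simp only [rowSz, List.map_cons, List.sum_cons]; push_cast; ring, ?_⟩
      simp [specRow]

lemma A_all (val : List (List (List Int))) : ∀ (idx : Int) (acc : List (List (List Int))),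
    val.foldl (fun (st : Int × List (List (List Int))) row =>
      let rr := row.foldl (fun (st2 : Int × List (List Int)) col =>
        let cc := col.foldl (fun (st3 : Int × List Int) _ => (st3.1 + 1, st3.2 ++ [st3.1])) (st2.1, [])
        (cc.1, st2.2 ++ [cc.2])) (st.1, [])
      (rr.1, st.2 ++ [rr.2])) (idx, acc)
      = (idx + totSz val, acc ++ specAll idx val) := by
  induction val with
  | nil => intro idx acc; simp [totSz, specAll]
  | cons r t ih =>
      intro idx acc
      simp only [List.foldl_cons, A_row r idx [], List.nil_append, ih, Prod.mk.injEq]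
      refine ⟨by simp only [totSz, List.map_cons, List.sum_cons]; push_cast; ring, ?_⟩
      simp [specAll]

/-- slicing a range gives the corresponding sub-range -/
lemma slice_pyRange (a : Int) (p l n : Nat) (h : p + l ≤ n) :
    PySem.List.slice (PySem.List.pyRange a (a + n) 1) (some (p : Int)) (some ((p : Int) + (l : Int)))
      = PySem.List.pyRange (a + p) (a + p + l) 1 := by
  rw [PySem.List.slice_natCast_add]
  rw [PySem.List.pyRange_one_append a (a + p) (a + n) (by omega) (by omega)]
  have hlen1 : (PySem.List.pyRange a (a + p) 1).length = p := by
    rw [PySem.List.length_pyRange_one]; omega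
  rw [List.drop_left' hlen1]
  rw [PySem.List.pyRange_one_append (a + p) (a + p + l) (a + n) (by omega) (by omega)]
  have hlen2 : (PySem.List.pyRange (a + p) (a + p + l) 1).length = l := by
    rw [PySem.List.length_pyRange_one]; omega
  rw [List.take_left' hlen2]

lemma B_row (start : Int) (N : Nat) (row : List (List Int)) :
    ∀ (p : Nat) (acc : List (List Int)), p + rowSz row ≤ N →
    row.foldl (fun (st2 : Int × List (List Int)) col =>
      (st2.1 + (col.length : Int),
       st2.2 ++ [PySem.List.slice (PySem.List.pyRange start (start + N) 1)
                  (some st2.1) (some (st2.1 + (col.length : Int)))])) ((p : Int), acc)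
      = (((p + rowSz row : Nat) : Int), acc ++ specRow (start + p) row) := by
  induction row with
  | nil => intro p acc _; simp [rowSz, specRow]
  | cons c t ih =>
      intro p acc hle
      have hsz : p + c.length + rowSz t ≤ N := by
        simp only [rowSz, List.map_cons, List.sum_cons] at hle ⊢; omega
      have hcast : ((p : Int) + (c.length : Int)) = ((p + c.length : Nat) : Int) := by push_cast; ring
      simp only [List.foldl_cons]
      rw [slice_pyRange start p c.length N (by omega), hcast,
          ih (p + c.length) _ (by omega)]
      simp only [Prod.mk.injEq]
      refine ⟨by simp only [rowSz, List.map_cons, List.sum_cons]; push_cast; ring, ?_⟩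
      have harg : ((p + c.length : Nat) : Int) = (p : Int) + (c.length : Int) := by push_cast; ring
      rw [harg]
      simp only [specRow, List.append_assoc, List.singleton_append]
      have hadd : start + ((p : Int) + (c.length : Int)) = start + (p : Int) + (c.length : Int) := by ring
      rw [hadd]

lemma B_all (start : Int) (N : Nat) (val : List (List (List Int))) :
    ∀ (p : Nat) (acc : List (List (List Int))), p + totSz val ≤ N →
    val.foldl (fun (st : Int × List (List (List Int))) row =>
      let rr := row.foldl (fun (st2 : Int × List (List Int)) col =>
        (st2.1 + (col.length : Int),
         st2.2 ++ [PySem.List.slice (PySem.List.pyRange start (start + N) 1)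
                    (some st2.1) (some (st2.1 + (col.length : Int)))])) (st.1, [])
      (rr.1, st.2 ++ [rr.2])) ((p : Int), acc)
      = (((p + totSz val : Nat) : Int), acc ++ specAll (start + p) val) := by
  induction val with
  | nil => intro p acc _; simp [totSz, specAll]
  | cons r t ih =>
      intro p acc hle
      have hsz : p + rowSz r + totSz t ≤ N := by
        simp only [totSz, List.map_cons, List.sum_cons] at hle ⊢; omega
      simp only [List.foldl_cons]
      rw [B_row start N r p [] (by omega), ih (p + rowSz r) _ (by omega)]
      simp only [Prod.mk.injEq]
      refine ⟨by simp only [totSz, List.map_cons, List.sum_cons]; push_cast; ring, ?_⟩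
      have harg : ((p + rowSz r : Nat) : Int) = (p : Int) + (rowSz r : Int) := by push_cast; ring
      rw [harg]
      simp only [specAll, List.nil_append, List.append_assoc, List.singleton_append]
      have hadd : start + ((p : Int) + ((rowSz r : Nat) : Int)) = start + (p : Int) + ((rowSz r : Nat) : Int) := by ring
      rw [hadd]

lemma N_eq (val : List (List (List Int))) :
    (val.map (fun row => (row.map (fun col => (col.length : Int))).sum)).sum = ((totSz val : Nat) : Int) := by
  induction val with
  | nil => simp [totSz]
  | cons r t ih =>
      simp only [totSz, List.map_cons, List.sum_cons] at *
      rw [ih]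
      push_cast [rowSz]
      simp [Function.comp_def]

-- ===== VERDICT (by name: the statement is the Claim_ definition above) =====
theorem ResControl2DF_spec : Claim_equal_ResControl2DF := by
  intro val start _
  unfold Spec_ResControl2DF ResControl2DF ResControl2DF_alt
  rw [A_all val start []]
  simp only [N_eq val]
  have h0 : ((0 : Int)) = ((0 : Nat) : Int) := by norm_num
  rw [h0, B_all start (totSz val) val 0 [] (by omega)]
  simp
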